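-- pv_equiv track=rewrite | github.com/WillithG/Blackjack_RL_Comparison_Tool | Code/DB/Users_DB.py | check_acceptable_password
-- ===== SOURCE A (Python) =====
-- def check_acceptable_password(password):
--     has_number = False
--     has_capital = False
--     ind = 0
--     pword_len = len(password)  # so it does not have to be recalculated
--     while not (has_number and has_capital) and (ind < pword_len):
--         unicode_num = ord(password[ind])
--         # checks if the character is a capital
--         if 65 <= unicode_num <= 90:
--             has_capital = True
--         # checks if the character is a number
--         elif 48 <= unicode_num <= 57:
--             has_number = True
--         ind += 1
--     return has_capital and has_number
-- ===== SOURCE B (Python) =====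
-- import re
--
-- def check_acceptable_password(password):
--     return bool(re.search(r'[A-Z]', password)) and bool(re.search(r'[0-9]', password))
-- ===== Notes on version B (the rewrite author's own statement) =====
-- stated objective: idiomatic
-- what changed: Replaces the manual indexed while-loop with early-exit state flags by two regex character-class searches ([A-Z] then [0-9]) whose results are conjoined.
import Mathlib
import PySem

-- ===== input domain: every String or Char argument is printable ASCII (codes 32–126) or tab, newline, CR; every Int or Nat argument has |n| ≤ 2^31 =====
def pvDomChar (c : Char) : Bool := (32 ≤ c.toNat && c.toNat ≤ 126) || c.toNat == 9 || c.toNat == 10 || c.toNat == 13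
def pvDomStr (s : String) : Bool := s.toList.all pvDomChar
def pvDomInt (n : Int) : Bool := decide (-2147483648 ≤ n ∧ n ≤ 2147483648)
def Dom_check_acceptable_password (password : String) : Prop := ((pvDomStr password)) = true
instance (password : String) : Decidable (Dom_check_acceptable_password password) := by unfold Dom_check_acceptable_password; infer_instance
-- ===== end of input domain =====

-- B is the idiomatic rewrite: two independent character-class scans ([A-Z], [0-9]) instead of A's single indexed while-loop with early-exit flags.

-- ===== PORT A =====
-- the while loop: state (has_number, has_capital), condition re-checked each round
def checkLoopA : List Char → Bool → Bool → Bool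
  | cs, has_number, has_capital =>
    if has_number && has_capital then has_capital && has_number
    else
      match cs with
      | [] => has_capital && has_number
      | c :: rest =>
        let unicode_num := c.toNat
        if 65 ≤ unicode_num ∧ unicode_num ≤ 90 then
          checkLoopA rest has_number true
        else if 48 ≤ unicode_num ∧ unicode_num ≤ 57 then
          checkLoopA rest true has_capital
        else
          checkLoopA rest has_number has_capital

def check_acceptable_password (password : String) : Bool :=
  checkLoopA password.toList false false

-- ===== PORT B =====
-- re.search(r'[A-Z]', s): does any character lie in the class; same for [0-9]
def reSearchAZ (s : String) : Bool := s.toList.any (fun c => 65 ≤ c.toNat && c.toNat ≤ 90)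
def reSearch09 (s : String) : Bool := s.toList.any (fun c => 48 ≤ c.toNat && c.toNat ≤ 57)

def check_acceptable_password_alt (password : String) : Bool :=
  reSearchAZ password && reSearch09 password

-- ===== PRECONDITION & SPEC =====
def Spec_check_acceptable_password (password : String) (out : Bool) : Prop := out = check_acceptable_password_alt password
instance (password : String) (out : Bool) : Decidable (Spec_check_acceptable_password password out) := by unfold Spec_check_acceptable_password; infer_instance

-- ===== CLAIM (what is proved, stated in full; the proofs are below) =====
def Claim_equal_check_acceptable_password : Prop := ∀ (password : String), Dom_check_acceptable_password password → Spec_check_acceptable_password password (check_acceptable_password password)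

-- ===== LEMMAS AND PROOFS =====
theorem checkLoopA_char (cs : List Char) (hn hc : Bool) :
    checkLoopA cs hn hc
      = ((hc || cs.any (fun c => 65 ≤ c.toNat && c.toNat ≤ 90)) &&
         (hn || cs.any (fun c => 48 ≤ c.toNat && c.toNat ≤ 57))) := by
  induction cs generalizing hn hc with
  | nil =>
    cases hn <;> cases hc <;> simp [checkLoopA]
  | cons c rest ih =>
    rw [checkLoopA]
    by_cases h1 : hn && hc
    · simp only [h1, if_true]
      cases hn <;> cases hc <;> simp_all
    · simp only [h1, if_false]
      by_cases hcap : 65 ≤ c.toNat ∧ c.toNat ≤ 90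
      · simp only [if_pos hcap, ih]
        have hnd : ¬ (c.toNat ≤ 57) := by omega
        simp [List.any_cons, hcap.1, hcap.2, hnd]
      · simp only [if_neg hcap]
        by_cases hdig : 48 ≤ c.toNat ∧ c.toNat ≤ 57
        · simp only [if_pos hdig, ih]
          have : ¬ (65 ≤ c.toNat && c.toNat ≤ 90) = true := by
            simp only [Bool.and_eq_true, decide_eq_true_eq]; exact hcap
          simp [List.any_cons, hdig.1, hdig.2, this]
        · simp only [if_neg hdig, ih]
          have h2 : ¬ (65 ≤ c.toNat && c.toNat ≤ 90) = true := by
            simp only [Bool.and_eq_true, decide_eq_true_eq]; exact hcap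
          have h3 : ¬ (48 ≤ c.toNat && c.toNat ≤ 57) = true := by
            simp only [Bool.and_eq_true, decide_eq_true_eq]; exact hdig
          simp [List.any_cons, h2, h3]

-- ===== VERDICT (by name: the statement is the Claim_ definition above) =====
theorem check_acceptable_password_spec : Claim_equal_check_acceptable_password := by
  intro password _
  unfold Spec_check_acceptable_password check_acceptable_password check_acceptable_password_alt reSearchAZ reSearch09
  rw [checkLoopA_char]
  simp [Bool.and_comm]
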